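-- pv_equiv track=rewrite | github.com/HJ23/Algorithms-for-interview- | SetOfKConsecutive/kconsecutive.py | find
-- ===== SOURCE A (Python) =====
-- def find(var):
--    arr,k=var
--    if(len(arr)%k!=0):
--       return False
--
--    dict={}
--    for x in arr:
--       if(x in dict):
--          dict[x]+=1
--       else:
--          dict[x]=1
--    counter=len(arr)
--    while(counter!=0):
--       minimum=min(dict.items(),key=lambda x:x[0])[0]
--       for i in range(k):
--          if(not minimum+i in dict):
--             return False
--          dict[minimum+i]-=1
--          if(dict[minimum+i]==0):
--             del dict[minimum+i]
--       counter-=k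
--    return True
-- ===== SOURCE B (Python) =====
-- def find(var):
--     arr, k = var
--     if len(arr) % k != 0:
--         return False
--     cnt = {}
--     for x in arr:
--         cnt[x] = cnt.get(x, 0) + 1
--     for x in sorted(cnt):
--         c = cnt[x]
--         if c > 0:
--             for i in range(1, k):
--                 if cnt.get(x + i, 0) < c:
--                     return False
--                 cnt[x + i] = cnt[x + i] - c
--     return True
-- ===== Notes on version B (the rewrite author's own statement) =====
-- stated objective: alternative
-- what changed: Instead of repeatedly scanning the whole dict for its minimum key and consuming one k-run per scan, B builds the counter once, sorts the distinct keys a single time, and for each key consumes all c runs starting there in one batched subtraction.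
import Mathlib
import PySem

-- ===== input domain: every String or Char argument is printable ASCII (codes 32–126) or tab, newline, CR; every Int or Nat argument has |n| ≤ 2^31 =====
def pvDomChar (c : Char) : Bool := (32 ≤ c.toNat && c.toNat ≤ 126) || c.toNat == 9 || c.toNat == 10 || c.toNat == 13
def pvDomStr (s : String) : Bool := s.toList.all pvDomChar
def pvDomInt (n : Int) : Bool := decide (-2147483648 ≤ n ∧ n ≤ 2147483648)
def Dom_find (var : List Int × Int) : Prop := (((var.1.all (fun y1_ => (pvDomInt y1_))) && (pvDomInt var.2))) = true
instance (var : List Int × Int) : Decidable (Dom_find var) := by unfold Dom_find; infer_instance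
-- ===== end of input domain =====

-- B replaces A's per-run rescan of the whole dict for its minimum key by one sort of the
-- distinct keys and a batched subtraction per start key (objective: alternative).

-- ===== PORT A =====
-- the inner `for i in range(k)` of A's while loop: check membership, decrement, delete at zero
def findRound (d : PySem.Dict Int Int) (m : Int) : List Int → Option (PySem.Dict Int Int)
  | [] => some d
  | i :: rest =>
    if d.contains (m + i) then
      let d1 := d.insert (m + i) (d.getD (m + i) 0 - 1)
      let d2 := if d1.getD (m + i) 0 = 0 then d1.erase (m + i) else d1
      findRound d2 m rest
    else none

-- A's `while counter != 0` loop; fuel bounds the iteration count (counter < fuel throughout)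
def findLoop (k : Int) : Nat → PySem.Dict Int Int → Int → Bool
  | 0, _, _ => false
  | fuel + 1, d, counter =>
    if counter = 0 then true
    else
      match PySem.List.min? d.items (fun p => p.1) with
      | none => false   -- min() of an empty dict raises in Python; unreachable inside Pre_find
      | some p =>
        match findRound d p.1 (PySem.List.pyRange 0 k 1) with
        | none => false
        | some d' => findLoop k fuel d' (counter - k)

def find (var : List Int × Int) : Bool :=
  let arr := var.1
  let k := var.2
  if PySem.Int.mod (arr.length : Int) k ≠ 0 then false
  else
    let d := arr.foldl
      (fun d x => if d.contains x then d.insert x (d.getD x 0 + 1) else d.insert x 1)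
      PySem.Dict.empty
    findLoop k (arr.length + 1) d (arr.length : Int)

-- ===== PORT B =====
-- B's inner `for i in range(1, k)`: batched subtraction of c from each of x+1 .. x+k-1
def altInner (cnt : PySem.Dict Int Int) (x c : Int) : List Int → Option (PySem.Dict Int Int)
  | [] => some cnt
  | i :: rest =>
    if cnt.getD (x + i) 0 < c then none
    else altInner (cnt.insert (x + i) (cnt.getD (x + i) 0 - c)) x c rest

-- B's `for x in sorted(cnt)` loop
def altLoop (k : Int) (cnt : PySem.Dict Int Int) : List Int → Bool
  | [] => true
  | x :: rest =>
    let c := cnt.getD x 0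
    if 0 < c then
      match altInner cnt x c (PySem.List.pyRange 1 k 1) with
      | none => false
      | some cnt' => altLoop k cnt' rest
    else altLoop k cnt rest

def find_alt (var : List Int × Int) : Bool :=
  let arr := var.1
  let k := var.2
  if PySem.Int.mod (arr.length : Int) k ≠ 0 then false
  else
    let cnt := arr.foldl (fun d x => d.insert x (d.getD x 0 + 1)) PySem.Dict.empty
    altLoop k cnt (PySem.List.sorted cnt.keys (fun y => y) false)


-- ===== PRECONDITION & SPEC =====
-- Pre_ excludes only k = 0, where A (and B) raise ZeroDivisionError, and k < 0 with a nonempty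
-- array whose length Python-mods k to 0, where A's while loop never terminates; on every other
-- input A returns normally.
def Pre_find (var : List Int × Int) : Prop :=
  var.2 ≠ 0 ∧ (0 < var.2 ∨ var.1 = [] ∨ PySem.Int.mod (var.1.length : Int) var.2 ≠ 0)
instance (var : List Int × Int) : Decidable (Pre_find var) := by unfold Pre_find; infer_instance
def pvWitness_find : (List Int × Int) := ([3, 1, 2, 4, 2, 3], 3)

def Spec_find (var : List Int × Int) (out : Bool) : Prop := out = find_alt var
instance (var : List Int × Int) (out : Bool) : Decidable (Spec_find var out) := by unfold Spec_find; infer_instance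

-- ===== CLAIM (what is proved, stated in full; the proofs are below) =====
def Claim_equal_find : Prop := ∀ (var : List Int × Int), Dom_find var → Pre_find var → Spec_find var (find var)

-- ===== LEMMAS AND PROOFS =====

lemma get?_erase_pv (d : PySem.Dict Int Int) (k j : Int) :
    (d.erase k).get? j = if j = k then none else d.get? j := by
  obtain ⟨l⟩ := d
  induction l with
  | nil => simp [PySem.Dict.erase, PySem.Dict.get?]
  | cons p t ih =>
    simp only [PySem.Dict.erase] at ih ⊢
    rw [List.filter_cons]
    by_cases hp : p.1 = k
    · simp only [hp, beq_self_eq_true, Bool.not_true, Bool.false_eq_true, if_false]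
      rw [ih]
      by_cases hj : j = k
      · simp [hj]
      · rw [if_neg hj, if_neg hj, PySem.Dict.get?_mk_cons,
          if_neg (by simp [hp]; exact fun h => hj (h ▸ rfl))]
    · rw [if_pos (by simp [hp])]
      rw [PySem.Dict.get?_mk_cons, PySem.Dict.get?_mk_cons]
      by_cases hpj : p.1 = j
      · have hj : ¬ j = k := by rw [← hpj]; exact hp
        simp [hpj, hj]
      · simp only [beq_iff_eq, hpj, if_false]
        rw [ih]

lemma getD_erase_pv (d : PySem.Dict Int Int) (k j : Int) :
    (d.erase k).getD j 0 = if j = k then 0 else d.getD j 0 := by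
  rw [PySem.Dict.getD_eq_get?_getD, get?_erase_pv, PySem.Dict.getD_eq_get?_getD]
  split <;> rfl

lemma contains_erase_pv (d : PySem.Dict Int Int) (k j : Int) :
    (d.erase k).contains j = if j = k then false else d.contains j := by
  rw [PySem.Dict.contains_eq_isSome_get?, get?_erase_pv, PySem.Dict.contains_eq_isSome_get?]
  split <;> rfl

lemma keys_erase_pv (d : PySem.Dict Int Int) (k : Int) :
    (d.erase k).keys = d.keys.filter (fun y => !(y == k)) := by
  obtain ⟨l⟩ := d
  show (l.filter (fun p => !(p.1 == k))).map (fun p => p.1)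
      = (l.map (fun p => p.1)).filter (fun y => !(y == k))
  induction l with
  | nil => rfl
  | cons h t ih => by_cases hh : h.1 = k <;> simp [hh, ih]

lemma nodup_keys_erase_pv (d : PySem.Dict Int Int) (k : Int) (h : d.keys.Nodup) :
    (d.erase k).keys.Nodup := by
  rw [keys_erase_pv]; exact h.filter _

-- sum over a nodup key list with one entry overwritten
lemma sum_map_ite_mem_pv (l : List Int) (hnd : l.Nodup) (x : Int) (hx : x ∈ l)
    (f : Int → Int) (w : Int) :
    (l.map (fun y => if y = x then w else f y)).sum = (l.map f).sum + w - f x := by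
  induction l with
  | nil => cases hx
  | cons a t ih =>
    rcases List.mem_cons.1 hx with h | h
    · subst h
      have hxt : x ∉ t := (List.nodup_cons.1 hnd).1
      have hcong : ∀ y ∈ t, (if y = x then w else f y) = f y := by
        intro y hy
        have : y ≠ x := fun e => hxt (e ▸ hy)
        simp [this]
      simp [List.map_congr_left hcong]
      ring
    · have ha : a ≠ x := fun e => (List.nodup_cons.1 hnd).1 (e ▸ h)
      simp only [List.map_cons, List.sum_cons, if_neg ha]
      rw [ih (List.nodup_cons.1 hnd).2 h]
      ring

lemma sum_map_filter_ne_pv (l : List Int) (hnd : l.Nodup) (k : Int) (f : Int → Int) :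
    ((l.filter (fun y => !(y == k))).map f).sum
      = (l.map f).sum - (if k ∈ l then f k else 0) := by
  induction l with
  | nil => simp
  | cons a t ih =>
    have ih' := ih (List.nodup_cons.1 hnd).2
    by_cases ha : a = k
    · subst ha
      have : a ∉ t := (List.nodup_cons.1 hnd).1
      simp [List.filter_cons, ih', this]
    · have ha' : ¬ k = a := fun e => ha e.symm
      by_cases hk : k ∈ t <;> simp [ha, ha', hk, ih'] <;> ring

def Stot (d : PySem.Dict Int Int) : Int := d.values.sum

def GoodD (d : PySem.Dict Int Int) : Prop :=
  d.keys.Nodup ∧ (∀ y : Int, d.contains y = true ↔ d.getD y 0 ≠ 0) ∧ (∀ y : Int, 0 ≤ d.getD y 0)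

lemma Stot_keys_pv (d : PySem.Dict Int Int) (h : d.keys.Nodup) :
    Stot d = (d.keys.map (fun y => d.getD y 0)).sum := by
  unfold Stot
  rw [PySem.Dict.values_eq_map_keys d h 0]

lemma Stot_insert_pv (d : PySem.Dict Int Int) (h : d.keys.Nodup) (k v : Int) :
    Stot (d.insert k v) = Stot d + v - d.getD k 0 := by
  by_cases hc : d.contains k = true
  · rw [Stot_keys_pv _ (PySem.Dict.nodup_keys_insert d k v h),
      PySem.Dict.keys_insert_of_contains d v hc]
    have hcong : ∀ y ∈ d.keys, (d.insert k v).getD y 0 = if y = k then v else d.getD y 0 := by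
      intro y _; rw [PySem.Dict.getD_insert]
    rw [List.map_congr_left hcong,
      sum_map_ite_mem_pv d.keys h k ((PySem.Dict.contains_iff_mem_keys d k).1 hc) (fun y => d.getD y 0) v,
      Stot_keys_pv d h]
  · have hcf : d.contains k = false := by simpa using hc
    have hknot : k ∉ d.keys := fun hm => hc ((PySem.Dict.contains_iff_mem_keys d k).2 hm)
    rw [Stot_keys_pv _ (PySem.Dict.nodup_keys_insert d k v h),
      PySem.Dict.keys_insert_of_not_contains d v hcf]
    have hcong : ∀ y ∈ d.keys, (d.insert k v).getD y 0 = d.getD y 0 := by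
      intro y hy
      rw [PySem.Dict.getD_insert, if_neg (show ¬ y = k from fun e => hknot (e ▸ hy))]
    rw [List.map_append, List.sum_append, List.map_congr_left hcong,
      PySem.Dict.getD_of_not_contains d 0 hcf, Stot_keys_pv d h]
    simp [PySem.Dict.getD_insert]

lemma Stot_erase_pv (d : PySem.Dict Int Int) (h : d.keys.Nodup) (k : Int) :
    Stot (d.erase k) = Stot d - d.getD k 0 := by
  rw [Stot_keys_pv _ (nodup_keys_erase_pv d k h), keys_erase_pv]
  have hcong : ∀ y ∈ d.keys.filter (fun y => !(y == k)), (d.erase k).getD y 0 = d.getD y 0 := by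
    intro y hy
    have : ¬ y = k := by simpa using (List.of_mem_filter hy)
    rw [getD_erase_pv, if_neg this]
  rw [List.map_congr_left hcong, sum_map_filter_ne_pv d.keys h k (fun y => d.getD y 0),
    Stot_keys_pv d h]
  by_cases hk : k ∈ d.keys
  · simp [hk]
  · have : d.contains k = false := by
      simpa using (fun hc => hk ((PySem.Dict.contains_iff_mem_keys d k).1 hc))
    simp [hk, PySem.Dict.getD_of_not_contains d 0 this]

lemma values_nonneg_pv (d : PySem.Dict Int Int) (h : GoodD d) : ∀ v ∈ d.values, 0 ≤ v := by
  intro v hv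
  obtain ⟨p, hp, hpv⟩ := List.mem_map.1 hv
  have := PySem.Dict.get?_of_mem_items d (k := p.1) (v := p.2) (by simpa using hp) h.1
  have hg : d.getD p.1 0 = p.2 := PySem.Dict.getD_of_get?_eq_some d 0 this
  rw [← hpv, ← hg]; exact h.2.2 p.1

lemma Stot_nonneg_pv (d : PySem.Dict Int Int) (h : GoodD d) : 0 ≤ Stot d :=
  List.sum_nonneg (values_nonneg_pv d h)

lemma getD_le_Stot_pv (d : PySem.Dict Int Int) (h : GoodD d) (x : Int) :
    d.getD x 0 ≤ Stot d := by
  by_cases hc : d.contains x = true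
  · have hs : (d.get? x).isSome := by
      rw [← PySem.Dict.contains_eq_isSome_get?]; exact hc
    obtain ⟨v, hv⟩ := Option.isSome_iff_exists.1 hs
    have hg : d.getD x 0 = v := PySem.Dict.getD_of_get?_eq_some d 0 hv
    have hmem : v ∈ d.values :=
      List.mem_map.2 ⟨(x, v), PySem.Dict.mem_items_of_get?_eq_some d hv, rfl⟩
    rw [hg]
    exact List.single_le_sum (values_nonneg_pv d h) v hmem
  · rw [PySem.Dict.getD_of_not_contains d 0 (by simpa using hc)]
    exact Stot_nonneg_pv d h

-- one decrement-and-maybe-delete step of A's inner loop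
lemma step_facts_pv (d : PySem.Dict Int Int) (y : Int) (h : GoodD d) (hy : d.getD y 0 ≠ 0) :
    GoodD (if (d.insert y (d.getD y 0 - 1)).getD y 0 = 0
             then (d.insert y (d.getD y 0 - 1)).erase y
             else d.insert y (d.getD y 0 - 1)) ∧
    (∀ z, (if (d.insert y (d.getD y 0 - 1)).getD y 0 = 0
             then (d.insert y (d.getD y 0 - 1)).erase y
             else d.insert y (d.getD y 0 - 1)).getD z 0
          = if z = y then d.getD y 0 - 1 else d.getD z 0) ∧
    Stot (if (d.insert y (d.getD y 0 - 1)).getD y 0 = 0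
             then (d.insert y (d.getD y 0 - 1)).erase y
             else d.insert y (d.getD y 0 - 1))
      = Stot d - 1 := by
  obtain ⟨hnd, hcg, hnn⟩ := h
  set c := d.getD y 0 with hc
  have hd1 : ∀ z, (d.insert y (c - 1)).getD z 0 = if z = y then c - 1 else d.getD z 0 := by
    intro z; rw [PySem.Dict.getD_insert]
  have hd1y : (d.insert y (c - 1)).getD y 0 = c - 1 := by rw [hd1]; simp
  have hnd1 : (d.insert y (c - 1)).keys.Nodup := PySem.Dict.nodup_keys_insert d y (c-1) hnd
  by_cases h0 : c - 1 = 0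
  · rw [if_pos (by rw [hd1y]; exact h0)]
    refine ⟨⟨nodup_keys_erase_pv _ y hnd1, ?_, ?_⟩, ?_, ?_⟩
    · intro z
      rw [contains_erase_pv, getD_erase_pv]
      by_cases hz : z = y
      · simp [hz]
      · rw [if_neg hz, if_neg hz, hd1, if_neg hz, PySem.Dict.contains_insert,
          show (z == y) = false by simpa using hz, Bool.false_or]
        exact hcg z
    · intro z
      rw [getD_erase_pv]
      by_cases hz : z = y
      · simp [hz]
      · rw [if_neg hz, hd1, if_neg hz]; exact hnn z
    · intro z
      rw [getD_erase_pv]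
      by_cases hz : z = y
      · simp [hz, h0]
      · rw [if_neg hz, if_neg hz, hd1, if_neg hz]
    · rw [Stot_erase_pv _ hnd1 y, hd1y, Stot_insert_pv d hnd y (c-1), ← hc]
      omega
  · rw [if_neg (by rw [hd1y]; exact h0)]
    refine ⟨⟨hnd1, ?_, ?_⟩, ?_, ?_⟩
    · intro z
      rw [PySem.Dict.contains_insert, hd1]
      by_cases hz : z = y
      · simp [hz, h0]
      · rw [if_neg hz, show (z == y) = false by simpa using hz, Bool.false_or]
        exact hcg z
    · intro z
      rw [hd1]
      by_cases hz : z = y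
      · rw [if_pos hz]
        have := hnn y; omega
      · rw [if_neg hz]; exact hnn z
    · exact hd1
    · rw [Stot_insert_pv d hnd y (c-1), ← hc]; omega

lemma round_some_pv (m : Int) : ∀ (is : List Int), is.Nodup → ∀ d : PySem.Dict Int Int,
    GoodD d → (∀ i ∈ is, d.getD (m + i) 0 ≠ 0) →
    ∃ d', findRound d m is = some d' ∧ GoodD d' ∧
      (∀ y, d'.getD y 0 = if y ∈ is.map (fun i => m + i) then d.getD y 0 - 1 else d.getD y 0) ∧
      Stot d' = Stot d - is.length := by
  intro is
  induction is with
  | nil =>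
    intro _ d hd _
    exact ⟨d, rfl, hd, by simp, by simp⟩
  | cons i rest ih =>
    intro hnd d hd hall
    have hi : d.getD (m + i) 0 ≠ 0 := hall i (List.mem_cons_self ..)
    have hcont : d.contains (m + i) = true := (hd.2.1 (m + i)).2 hi
    obtain ⟨hg2, hdesc2, hs2⟩ := step_facts_pv d (m + i) hd hi
    set d2 := (if (d.insert (m+i) (d.getD (m+i) 0 - 1)).getD (m+i) 0 = 0
             then (d.insert (m+i) (d.getD (m+i) 0 - 1)).erase (m+i)
             else d.insert (m+i) (d.getD (m+i) 0 - 1)) with hd2def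
    have hrest : ∀ j ∈ rest, d2.getD (m + j) 0 ≠ 0 := by
      intro j hj
      have hji : j ≠ i := fun e => (List.nodup_cons.1 hnd).1 (e ▸ hj)
      rw [hdesc2, if_neg (by intro e; exact hji (by omega))]
      exact hall j (List.mem_cons_of_mem _ hj)
    obtain ⟨d', hrun, hg', hdesc', hs'⟩ := ih (List.nodup_cons.1 hnd).2 d2 hg2 hrest
    refine ⟨d', ?_, hg', ?_, ?_⟩
    · show findRound d m (i :: rest) = some d'
      rw [findRound, if_pos hcont]
      exact hrun
    · intro y
      rw [hdesc' y, hdesc2 y]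
      by_cases hy : y = m + i
      · have hnotin : y ∉ rest.map (fun j => m + j) := by
          intro hmem
          obtain ⟨j, hj, hje⟩ := List.mem_map.1 hmem
          have hje' : m + j = y := hje
          have hji : j = i := by omega
          exact (List.nodup_cons.1 hnd).1 (hji ▸ hj)
        simp [hy, hnotin]
        exact (List.nodup_cons.1 hnd).1
      · by_cases hmem : y ∈ rest.map (fun j => m + j) <;> simp [hmem, hy]
    · rw [hs', hs2]
      simp only [List.length_cons]
      push_cast
      ring

lemma round_none_pv (m : Int) : ∀ (is : List Int), ∀ d : PySem.Dict Int Int,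
    GoodD d → (∃ i ∈ is, d.getD (m + i) 0 = 0) → findRound d m is = none := by
  intro is
  induction is with
  | nil => rintro d _ ⟨i, hi, _⟩; cases hi
  | cons i rest ih =>
    rintro d hd ⟨j, hj, hj0⟩
    by_cases hi : d.getD (m + i) 0 = 0
    · have : d.contains (m + i) = false := by
        have := (hd.2.1 (m + i))
        rcases Bool.eq_false_or_eq_true (d.contains (m + i)) with h | h
        · exact absurd (this.1 h) (by simpa using hi)
        · exact h
      rw [findRound, if_neg (by simp [this])]
    · obtain ⟨hg2, hdesc2, _⟩ := step_facts_pv d (m + i) hd hi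
      have hcont : d.contains (m + i) = true := (hd.2.1 (m + i)).2 hi
      have hji : j ≠ i := fun e => hi (e ▸ hj0)
      have hjr : j ∈ rest := by
        rcases List.mem_cons.1 hj with h | h
        · exact absurd h hji
        · exact h
      rw [findRound, if_pos hcont]
      apply ih _ hg2
      refine ⟨j, hjr, ?_⟩
      rw [hdesc2, if_neg (by intro e; exact hji (by omega))]
      exact hj0

lemma min_items_pv (d : PySem.Dict Int Int) (h : GoodD d) (x : Int)
    (hx : d.getD x 0 ≠ 0) (hmin : ∀ y : Int, d.getD y 0 ≠ 0 → x ≤ y) :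
    PySem.List.min? d.items (fun p => p.1) = some (x, d.getD x 0) := by
  have hcont : d.contains x = true := (h.2.1 x).2 hx
  have hs : (d.get? x).isSome := by
    rw [← PySem.Dict.contains_eq_isSome_get?]; exact hcont
  obtain ⟨v, hv⟩ := Option.isSome_iff_exists.1 hs
  have hgv : d.getD x 0 = v := PySem.Dict.getD_of_get?_eq_some d 0 hv
  have hxv : (x, v) ∈ d.items := PySem.Dict.mem_items_of_get?_eq_some d hv
  have hne : d.items ≠ [] := by intro e; rw [e] at hxv; cases hxv
  obtain ⟨p, hp⟩ : ∃ p, PySem.List.min? d.items (fun p => p.1) = some p := by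
    rcases ho : PySem.List.min? d.items (fun p => p.1) with _ | p
    · exact absurd ((PySem.List.min?_eq_none_iff _ _).1 ho) hne
    · exact ⟨p, rfl⟩
  have hpmem : p ∈ d.items := PySem.List.min?_mem hp
  have hple : p.1 ≤ x := PySem.List.min?_isMin hp (x, v) hxv
  have hpget : d.get? p.1 = some p.2 := PySem.Dict.get?_of_mem_items d (by simpa using hpmem) h.1
  have hpgd : d.getD p.1 0 = p.2 := PySem.Dict.getD_of_get?_eq_some d 0 hpget
  have hpc : d.contains p.1 = true := by
    rw [PySem.Dict.contains_eq_isSome_get?, hpget]; rfl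
  have hpne : d.getD p.1 0 ≠ 0 := (h.2.1 p.1).1 hpc
  have hxp : x ≤ p.1 := hmin p.1 hpne
  have hp1 : p.1 = x := le_antisymm hple hxp
  have hp2 : p.2 = v := by
    have := hpget
    rw [hp1, hv] at this
    exact (Option.some_inj.1 this).symm
  rw [hp, hgv]
  rw [show p = (x, v) from Prod.ext hp1 hp2]

lemma inner_some_pv (x c : Int) : ∀ (is : List Int), is.Nodup → ∀ cnt : PySem.Dict Int Int,
    (∀ i ∈ is, c ≤ cnt.getD (x + i) 0) →
    ∃ cnt', altInner cnt x c is = some cnt' ∧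
      ∀ y, cnt'.getD y 0 = if y ∈ is.map (fun i => x + i) then cnt.getD y 0 - c else cnt.getD y 0 := by
  intro is
  induction is with
  | nil => intro _ cnt _; exact ⟨cnt, rfl, by simp⟩
  | cons i rest ih =>
    intro hnd cnt hall
    have hi : c ≤ cnt.getD (x + i) 0 := hall i (List.mem_cons_self ..)
    set cnt2 := cnt.insert (x + i) (cnt.getD (x + i) 0 - c) with hcnt2
    have hdesc2 : ∀ z, cnt2.getD z 0 = if z = x + i then cnt.getD (x + i) 0 - c else cnt.getD z 0 := by
      intro z; rw [hcnt2, PySem.Dict.getD_insert]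
    have hrest : ∀ j ∈ rest, c ≤ cnt2.getD (x + j) 0 := by
      intro j hj
      have hji : j ≠ i := fun e => (List.nodup_cons.1 hnd).1 (e ▸ hj)
      rw [hdesc2, if_neg (by intro e; exact hji (by omega))]
      exact hall j (List.mem_cons_of_mem _ hj)
    obtain ⟨cnt', hrun, hdesc'⟩ := ih (List.nodup_cons.1 hnd).2 cnt2 hrest
    refine ⟨cnt', ?_, ?_⟩
    · show altInner cnt x c (i :: rest) = some cnt'
      rw [altInner, if_neg (by omega)]
      exact hrun
    · intro y
      rw [hdesc' y, hdesc2 y]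
      by_cases hy : y = x + i
      · have hnotin : y ∉ rest.map (fun j => x + j) := by
          intro hmem
          obtain ⟨j, hj, hje⟩ := List.mem_map.1 hmem
          have hje' : x + j = y := hje
          have hji : j = i := by omega
          exact (List.nodup_cons.1 hnd).1 (hji ▸ hj)
        simp [hy, hnotin]
        intro hmem
        exact absurd hmem (List.nodup_cons.1 hnd).1
      · by_cases hmem : y ∈ rest.map (fun j => x + j) <;> simp [hmem, hy]

lemma inner_none_pv (x c : Int) : ∀ (is : List Int), is.Nodup → ∀ cnt : PySem.Dict Int Int,
    (∃ i ∈ is, cnt.getD (x + i) 0 < c) → altInner cnt x c is = none := by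
  intro is
  induction is with
  | nil => rintro _ cnt ⟨i, hi, _⟩; cases hi
  | cons i rest ih =>
    rintro hnd cnt ⟨j, hj, hjlt⟩
    by_cases hi : cnt.getD (x + i) 0 < c
    · rw [altInner, if_pos hi]
    · have hji : j ≠ i := fun e => hi (e ▸ hjlt)
      have hjr : j ∈ rest := by
        rcases List.mem_cons.1 hj with h | h
        · exact absurd h hji
        · exact h
      rw [altInner, if_neg hi]
      apply ih (List.nodup_cons.1 hnd).2
      refine ⟨j, hjr, ?_⟩
      rw [PySem.Dict.getD_insert, if_neg (by intro e; exact hji (by omega))]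
      exact hjlt

lemma batch_pv (k : Int) (hk : 1 ≤ k) (x : Int) :
    ∀ (n : Nat) (c : Int), c = (n : Int) → 1 ≤ c →
    ∀ (d : PySem.Dict Int Int) (counter : Int) (fuel : Nat),
      GoodD d → d.getD x 0 = c → (∀ y : Int, d.getD y 0 ≠ 0 → x ≤ y) →
      counter = Stot d → counter < (fuel : Int) →
      ((∀ i ∈ PySem.List.pyRange 1 k 1, c ≤ d.getD (x + i) 0) →
         ∃ (d₂ : PySem.Dict Int Int) (fuel₂ : Nat),
           findLoop k fuel d counter = findLoop k fuel₂ d₂ (counter - c * k) ∧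
           GoodD d₂ ∧
           (∀ y : Int, d₂.getD y 0 = if y = x then 0 else
              if y ∈ (PySem.List.pyRange 1 k 1).map (fun i => x + i) then d.getD y 0 - c
              else d.getD y 0) ∧
           Stot d₂ = Stot d - c * k ∧ counter - c * k < (fuel₂ : Int)) ∧
      ((∃ i ∈ PySem.List.pyRange 1 k 1, d.getD (x + i) 0 < c) →
         findLoop k fuel d counter = false) := by
  intro n
  induction n with
  | zero => intro c hc h1; exact absurd h1 (by omega)
  | succ m ih =>
    intro c hc h1 d counter fuel hg hgx hmin hcnt hlt
    have hstotx := getD_le_Stot_pv d hg x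
    have hcnt0 : ¬ counter = 0 := by omega
    obtain ⟨f, rfl⟩ : ∃ f, fuel = f + 1 := ⟨fuel - 1, by omega⟩
    have hflt : counter - k < (f : Int) := by push_cast at hlt ⊢; omega
    have hrange0 : PySem.List.pyRange 0 k 1 = 0 :: PySem.List.pyRange 1 k 1 :=
      PySem.List.pyRange_one_cons (by omega)
    have hnd0 : (PySem.List.pyRange 0 k 1).Nodup := PySem.List.nodup_pyRange_one 0 k
    have hmineq := min_items_pv d hg x (by omega) hmin
    have hunf : findLoop k (f + 1) d counter =
        (match findRound d x (PySem.List.pyRange 0 k 1) with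
         | none => false
         | some d' => findLoop k f d' (counter - k)) := by
      rw [findLoop, if_neg hcnt0, hmineq]
    have hlen0 : ((PySem.List.pyRange 0 k 1).length : Int) = k := by
      rw [PySem.List.length_pyRange_one]; omega
    have hxnotin1 : x ∉ (PySem.List.pyRange 1 k 1).map (fun i => x + i) := by
      intro hmem
      obtain ⟨i, hi, hie⟩ := List.mem_map.1 hmem
      have : (1 : Int) ≤ i := (PySem.List.mem_pyRange_one.1 hi).1
      omega
    constructor
    · -- success branch
      intro hsucc
      have hall0 : ∀ i ∈ PySem.List.pyRange 0 k 1, d.getD (x + i) 0 ≠ 0 := by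
        intro i hi
        rw [hrange0] at hi
        rcases List.mem_cons.1 hi with h | h
        · subst h; rw [show x + (0:Int) = x from by ring]; omega
        · have := hsucc i h; omega
      obtain ⟨d', hrun, hg', hdesc', hs'⟩ := round_some_pv x _ hnd0 d hg hall0
      have hstep : findLoop k (f + 1) d counter = findLoop k f d' (counter - k) := by
        rw [hunf, hrun]
      have hd'x : d'.getD x 0 = c - 1 := by
        rw [hdesc' x, if_pos (by rw [hrange0]; exact List.mem_map.2 ⟨0, List.mem_cons_self .., by simp⟩), hgx]
      have hdesc'' : ∀ y, d'.getD y 0 = if y = x then c - 1 else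
          if y ∈ (PySem.List.pyRange 1 k 1).map (fun i => x + i) then d.getD y 0 - 1
          else d.getD y 0 := by
        intro y
        by_cases hy : y = x
        · rw [if_pos hy, hy, hd'x]
        · rw [hdesc' y, if_neg hy, hrange0]
          by_cases hmem : y ∈ (PySem.List.pyRange 1 k 1).map (fun i => x + i)
          · rw [if_pos hmem, if_pos (by simpa using Or.inr hmem)]
          · rw [if_neg hmem, if_neg (by
              intro hmem0
              rcases List.mem_map.1 hmem0 with ⟨i, hi, hie⟩
              rcases List.mem_cons.1 hi with h | h
              · exact hy (by omega)
              · exact hmem (List.mem_map.2 ⟨i, h, hie⟩))]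
      have hs'' : Stot d' = Stot d - k := by rw [hs', hlen0]
      have hmin' : ∀ y : Int, d'.getD y 0 ≠ 0 → x ≤ y := by
        intro y hy
        apply hmin
        rw [hdesc' y] at hy
        by_cases hmem : y ∈ (PySem.List.pyRange 0 k 1).map (fun i => x + i)
        · rcases List.mem_map.1 hmem with ⟨i, hi, hie⟩
          exact hall0 i hi ∘ (by rw [hie]; exact id)
        · rw [if_neg hmem] at hy; exact hy
      by_cases hm : m = 0
      · -- c = 1: one round was the whole batch
        have hc1 : c = 1 := by omega
        refine ⟨d', f, ?_, hg', ?_, ?_, ?_⟩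
        · rw [show counter - c * k = counter - k from by rw [hc1]; ring]
          exact hstep
        · intro y
          rw [hdesc'' y, hc1]
          by_cases hy : y = x
          · simp [hy]
          · simp [hy]
        · rw [hs'', hc1]; omega
        · rw [hc1]; push_cast at hflt ⊢; omega
      · -- c ≥ 2: recurse
        have hm1 : (1 : Int) ≤ c - 1 := by omega
        have ihd := ih (c - 1) (by omega) hm1 d' (counter - k) f hg'
          (by rw [hd'x]) hmin' (by omega) hflt
        have hsucc' : ∀ i ∈ PySem.List.pyRange 1 k 1, c - 1 ≤ d'.getD (x + i) 0 := by
          intro i hi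
          rw [hdesc'' (x + i), if_neg (by
              have : (1 : Int) ≤ i := (PySem.List.mem_pyRange_one.1 hi).1
              omega),
            if_pos (List.mem_map.2 ⟨i, hi, rfl⟩)]
          have := hsucc i hi; omega
        obtain ⟨d₂, fuel₂, heq, hg₂, hdesc₂, hs₂, hlt₂⟩ := ihd.1 hsucc'
        refine ⟨d₂, fuel₂, ?_, hg₂, ?_, ?_, ?_⟩
        · rw [hstep, heq]
          congr 1
          ring
        · intro y
          rw [hdesc₂ y]
          by_cases hy : y = x
          · simp [hy]
          · rw [if_neg hy, if_neg hy]
            by_cases hmem : y ∈ (PySem.List.pyRange 1 k 1).map (fun i => x + i)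
            · rw [if_pos hmem, if_pos hmem, hdesc'' y, if_neg hy, if_pos hmem]
              ring
            · rw [if_neg hmem, if_neg hmem, hdesc'' y, if_neg hy, if_neg hmem]
        · rw [hs₂, hs'']; ring
        · have : counter - k - (c - 1) * k = counter - c * k := by ring
          rw [this] at hlt₂; exact hlt₂
    · -- failure branch
      rintro ⟨i, hi, hilt⟩
      by_cases hzero : ∃ j ∈ PySem.List.pyRange 0 k 1, d.getD (x + j) 0 = 0
      · rw [hunf, round_none_pv x _ d hg hzero]
      · push_neg at hzero
        obtain ⟨d', hrun, hg', hdesc', hs'⟩ := round_some_pv x _ hnd0 d hg hzero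
        have hstep : findLoop k (f + 1) d counter = findLoop k f d' (counter - k) := by
          rw [hunf, hrun]
        have hi0 : i ∈ PySem.List.pyRange 0 k 1 := by
          rw [hrange0]; exact List.mem_cons_of_mem _ hi
        have hm1 : m ≠ 0 := by
          intro hm0
          have := hzero i hi0
          have hnn := hg.2.2 (x + i)
          omega
        have hd'x : d'.getD x 0 = c - 1 := by
          rw [hdesc' x, if_pos (by rw [hrange0]; exact List.mem_map.2 ⟨0, List.mem_cons_self .., by simp⟩), hgx]
        have hmin' : ∀ y : Int, d'.getD y 0 ≠ 0 → x ≤ y := by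
          intro y hy
          apply hmin
          rw [hdesc' y] at hy
          by_cases hmem : y ∈ (PySem.List.pyRange 0 k 1).map (fun i => x + i)
          · rcases List.mem_map.1 hmem with ⟨j, hj, hje⟩
            exact hzero j hj ∘ (by rw [hje]; exact id)
          · rw [if_neg hmem] at hy; exact hy
        have ihd := ih (c - 1) (by omega) (by omega) d' (counter - k) f hg'
          (by rw [hd'x]) hmin' (by omega) hflt
        rw [hstep]
        apply ihd.2
        refine ⟨i, hi, ?_⟩
        rw [hdesc' (x + i), if_pos (List.mem_map.2 ⟨i, hi0, rfl⟩)]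
        omega

lemma main_sim_pv (k : Int) (hk : 1 ≤ k) :
    ∀ (ks : List Int) (pre : List Int), (pre ++ ks).Pairwise (· < ·) →
    ∀ (d cnt : PySem.Dict Int Int) (counter : Int) (fuel : Nat),
      GoodD d →
      (∀ y : Int, d.getD y 0 ≠ 0 → y ∈ ks) →
      (∀ y ∈ ks, d.getD y 0 = cnt.getD y 0) →
      (∀ y : Int, cnt.getD y 0 ≠ 0 → y ∈ pre ++ ks) →
      counter = Stot d → counter < (fuel : Int) →
      findLoop k fuel d counter = altLoop k cnt ks := by
  intro ks
  induction ks with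
  | nil =>
    intro pre _ d cnt counter fuel hg h1 _ _ hcnt hlt
    have hkeys : d.keys = [] := by
      rw [List.eq_nil_iff_forall_not_mem]
      intro y hy
      have hc : d.contains y = true := (PySem.Dict.contains_iff_mem_keys d y).2 hy
      cases h1 y ((hg.2.1 y).1 hc)
    have hstot : Stot d = 0 := by
      rw [Stot_keys_pv d hg.1, hkeys]; rfl
    obtain ⟨f, rfl⟩ : ∃ f, fuel = f + 1 := ⟨fuel - 1, by omega⟩
    rw [findLoop, if_pos (by omega), altLoop]
  | cons x rest ih =>
    intro pre hpw d cnt counter fuel hg h1 h2 h3 hcnt hlt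
    obtain ⟨hppre, hpcons, hcross⟩ := List.pairwise_append.1 hpw
    have hxrest : ∀ y ∈ rest, x < y := (List.pairwise_cons.1 hpcons).1
    have hxnotr : x ∉ rest := fun hm => lt_irrefl x (hxrest x hm)
    have hpw' : ((pre ++ [x]) ++ rest).Pairwise (· < ·) := by
      rw [List.append_assoc]; exact hpw
    have hc0 : d.getD x 0 = cnt.getD x 0 := h2 x (List.mem_cons_self ..)
    have hnn := hg.2.2
    have hnd1 : (PySem.List.pyRange 1 k 1).Nodup := PySem.List.nodup_pyRange_one 1 k
    have hbridge : ∀ i ∈ PySem.List.pyRange 1 k 1, d.getD (x + i) 0 = cnt.getD (x + i) 0 := by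
      intro i hi
      have hi1 : (1 : Int) ≤ i := (PySem.List.mem_pyRange_one.1 hi).1
      by_cases hmem : x + i ∈ rest
      · exact h2 (x + i) (List.mem_cons_of_mem _ hmem)
      · have hdz : d.getD (x + i) 0 = 0 := by
          by_contra hne
          rcases List.mem_cons.1 (h1 (x + i) hne) with h | h
          · omega
          · exact hmem h
        have hcz : cnt.getD (x + i) 0 = 0 := by
          by_contra hne
          rcases List.mem_append.1 (h3 (x + i) hne) with h | h
          · have := hcross (x + i) h x (List.mem_cons_self ..); omega
          · rcases List.mem_cons.1 h with h' | h'
            · omega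
            · exact hmem h'
        rw [hdz, hcz]
    by_cases hcpos : 0 < cnt.getD x 0
    · -- positive count: one batch on the A side, one inner pass on the B side
      set c := cnt.getD x 0 with hcdef
      have hgx : d.getD x 0 = c := hc0
      have hmin : ∀ y : Int, d.getD y 0 ≠ 0 → x ≤ y := by
        intro y hy
        rcases List.mem_cons.1 (h1 y hy) with h | h
        · omega
        · exact le_of_lt (hxrest y h)
      have hbatch := batch_pv k hk x c.toNat c (by omega) (by omega) d counter fuel
        hg hgx hmin hcnt hlt
      by_cases hall : ∀ i ∈ PySem.List.pyRange 1 k 1, c ≤ cnt.getD (x + i) 0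
      · have halld : ∀ i ∈ PySem.List.pyRange 1 k 1, c ≤ d.getD (x + i) 0 := by
          intro i hi; rw [hbridge i hi]; exact hall i hi
        obtain ⟨d₂, fuel₂, heq, hg₂, hdesc₂, hs₂, hlt₂⟩ := hbatch.1 halld
        obtain ⟨cnt', hrun, hdesc'⟩ := inner_some_pv x c _ hnd1 cnt hall
        have hbstep : altLoop k cnt (x :: rest) = altLoop k cnt' rest := by
          rw [altLoop]
          simp only [← hcdef, if_pos hcpos, hrun]
        rw [heq, hbstep]
        apply ih (pre ++ [x]) hpw' d₂ cnt' (counter - c * k) fuel₂ hg₂ ?_ ?_ ?_ ?_ hlt₂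
        · intro y hy
          rw [hdesc₂ y] at hy
          by_cases hyx : y = x
          · rw [if_pos hyx] at hy; exact absurd rfl hy
          · rw [if_neg hyx] at hy
            by_cases hmem : y ∈ (PySem.List.pyRange 1 k 1).map (fun i => x + i)
            · rw [if_pos hmem] at hy
              obtain ⟨i, hi, hie⟩ := List.mem_map.1 hmem
              have : c ≤ d.getD y 0 := by rw [← hie]; exact halld i hi
              have : d.getD y 0 ≠ 0 := by omega
              rcases List.mem_cons.1 (h1 y this) with h | h
              · exact absurd h hyx
              · exact h
            · rw [if_neg hmem] at hy
              rcases List.mem_cons.1 (h1 y hy) with h | h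
              · exact absurd h hyx
              · exact h
        · intro y hyr
          have hyx : y ≠ x := fun e => hxnotr (e ▸ hyr)
          rw [hdesc₂ y, if_neg hyx, hdesc' y]
          by_cases hmem : y ∈ (PySem.List.pyRange 1 k 1).map (fun i => x + i)
          · rw [if_pos hmem, if_pos hmem]
            obtain ⟨i, hi, hie⟩ := List.mem_map.1 hmem
            rw [← hie, hbridge i hi]
          · rw [if_neg hmem, if_neg hmem]
            exact h2 y (List.mem_cons_of_mem _ hyr)
        · intro y hy
          rw [hdesc' y] at hy
          rw [List.append_assoc]
          by_cases hmem : y ∈ (PySem.List.pyRange 1 k 1).map (fun i => x + i)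
          · rw [if_pos hmem] at hy
            obtain ⟨i, hi, hie⟩ := List.mem_map.1 hmem
            have : c ≤ cnt.getD y 0 := by rw [← hie]; exact hall i hi
            exact h3 y (by omega)
          · rw [if_neg hmem] at hy
            exact h3 y hy
        · rw [hs₂, hcnt]
      · push_neg at hall
        obtain ⟨i, hi, hilt⟩ := hall
        have hfail := hbatch.2 ⟨i, hi, by rw [hbridge i hi]; exact hilt⟩
        have hbfail : altLoop k cnt (x :: rest) = false := by
          rw [altLoop]
          simp only [← hcdef, if_pos hcpos,
            inner_none_pv x c _ hnd1 cnt ⟨i, hi, hilt⟩]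
        rw [hfail, hbfail]
    · -- zero count: B skips this key; A's dict does not contain it
      have hbstep : altLoop k cnt (x :: rest) = altLoop k cnt rest := by
        rw [altLoop]
        simp only [if_neg hcpos]
      rw [hbstep]
      apply ih (pre ++ [x]) hpw' d cnt counter fuel hg ?_ ?_ ?_ hcnt hlt
      · intro y hy
        rcases List.mem_cons.1 (h1 y hy) with h | h
        · exfalso
          have hyx : d.getD y 0 = cnt.getD x 0 := by rw [h, hc0]
          have := hnn y
          omega
        · exact h
      · intro y hyr
        exact h2 y (List.mem_cons_of_mem _ hyr)
      · intro y hy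
        rw [List.append_assoc]
        exact h3 y hy

lemma sum_counts_pv (arr : List Int) : ∀ l : List Int, l.Nodup → (∀ y ∈ arr, y ∈ l) →
    (l.map (fun y => (arr.count y : Int))).sum = arr.length := by
  induction arr with
  | nil => intro l _ _; simp
  | cons a t iht =>
    intro l hnd hsub
    have ha : a ∈ l := hsub a (List.mem_cons_self ..)
    have hsub' : ∀ y ∈ t, y ∈ l := fun y hy => hsub y (List.mem_cons_of_mem _ hy)
    have hcong : ∀ y ∈ l, (((a :: t).count y : Int))
        = (t.count y : Int) + (if y = a then (1 : Int) else 0) := by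
      intro y _
      rw [List.count_cons]
      by_cases h : y = a
      · simp [h]
      · simp [h, Ne.symm h]
    rw [List.map_congr_left hcong, PySem.List.sum_map_add_int, iht l hnd hsub',
      sum_map_ite_mem_pv l hnd a ha (fun _ => (0 : Int)) 1]
    simp

lemma goodD_counter_pv (arr : List Int) : GoodD (PySem.Dict.counter arr) := by
  refine ⟨PySem.Dict.nodup_keys_counter arr, ?_, ?_⟩
  · intro y
    rw [PySem.Dict.contains_counter, PySem.Dict.getD_counter]
    constructor
    · intro h
      have : y ∈ arr := by simpa using h
      have := List.count_pos_iff.2 this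
      omega
    · intro h
      have : 0 < arr.count y := by omega
      simpa using List.count_pos_iff.1 this
  · intro y
    rw [PySem.Dict.getD_counter]
    positivity

lemma stot_counter_pv (arr : List Int) : Stot (PySem.Dict.counter arr) = arr.length := by
  rw [Stot_keys_pv _ (PySem.Dict.nodup_keys_counter arr), PySem.Dict.keys_counter]
  have hcong : ∀ y ∈ PySem.Set.ofList arr, (PySem.Dict.counter arr).getD y 0 = (arr.count y : Int) := by
    intro y _; rw [PySem.Dict.getD_counter]
  rw [List.map_congr_left hcong]
  exact sum_counts_pv arr _ (PySem.Set.nodup_ofList arr) (fun y hy => (PySem.Set.mem_ofList arr y).2 hy)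

-- ===== VERDICT (by name: the statement is the Claim_ definition above) =====
theorem find_spec : Claim_equal_find := by
  unfold Claim_equal_find Spec_find
  rintro ⟨arr, k⟩ _ ⟨hk0, hpre⟩
  show find (arr, k) = find_alt (arr, k)
  unfold find find_alt
  simp only []
  by_cases hmod : PySem.Int.mod (arr.length : Int) k = 0
  · have hmod' : ¬ (PySem.Int.mod (arr.length : Int) k ≠ 0) := by simpa using hmod
    rw [if_neg hmod', if_neg hmod', PySem.Dict.foldl_insert_getD_add_one_eq_counter]
    have hfoldA : arr.foldl
        (fun d x => if d.contains x then d.insert x (d.getD x 0 + 1) else d.insert x 1)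
        PySem.Dict.empty = PySem.Dict.counter arr := by
      rw [← PySem.Dict.foldl_insert_getD_add_one_eq_counter]
      apply PySem.List.foldl_congr_mem
      intro d x _
      by_cases hc : d.contains x = true
      · rw [if_pos hc]
      · rw [if_neg hc, PySem.Dict.getD_of_not_contains d 0 (by simpa using hc)]
        norm_num
    rw [hfoldA]
    by_cases hkpos : 1 ≤ k
    · apply main_sim_pv k hkpos _ [] ?_ _ _ _ _ (goodD_counter_pv arr) ?_ ?_ ?_ ?_ ?_
      · show (PySem.List.sorted (PySem.Dict.counter arr).keys (fun y => y) false).Pairwise (· < ·)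
        rw [PySem.Dict.keys_counter]
        exact PySem.List.sorted_ofList_pairwise_lt arr
      · intro y hy
        rw [PySem.Dict.getD_counter] at hy
        rw [PySem.List.mem_sorted, PySem.Dict.keys_counter, PySem.Set.mem_ofList]
        have : 0 < arr.count y := by omega
        simpa using List.count_pos_iff.1 this
      · intro y _; rfl
      · intro y hy
        rw [PySem.Dict.getD_counter] at hy
        rw [List.nil_append, PySem.List.mem_sorted, PySem.Dict.keys_counter, PySem.Set.mem_ofList]
        have : 0 < arr.count y := by omega
        simpa using List.count_pos_iff.1 this
      · rw [stot_counter_pv]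
      · push_cast; omega
    · have harr : arr = [] := by
        rcases hpre with h | h | h
        · omega
        · exact h
        · exact absurd hmod h
      subst harr
      rfl
  · have hmod' : PySem.Int.mod (arr.length : Int) k ≠ 0 := hmod
    rw [if_pos hmod', if_pos hmod']
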